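-- pv_equiv track=rewrite | github.com/cheykoff/thinkpython2e | 10-12-interlock-3way.py | get_every_second_letter
-- ===== SOURCE A (Python) =====
-- def get_every_second_letter(word, start):
-- 	sec_word = ''
-- 	i = 0
-- 	while i < len(word):
-- 		if (i + start) % 3 == 0:
-- 			sec_word += word[i]
-- 		i += 1
-- 	return sec_word
-- ===== SOURCE B (Python) =====
-- def get_every_second_letter(word, start):
--     return word[(-start) % 3::3]
-- ===== Notes on version B (the rewrite author's own statement) =====
-- stated objective: faster
-- what changed: Replaces the per-index while loop with a modulo test and repeated string concatenation by a single strided slice word[(-start)%3::3], whose start offset is the first index i with (i+start)%3==0.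
import Mathlib
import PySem

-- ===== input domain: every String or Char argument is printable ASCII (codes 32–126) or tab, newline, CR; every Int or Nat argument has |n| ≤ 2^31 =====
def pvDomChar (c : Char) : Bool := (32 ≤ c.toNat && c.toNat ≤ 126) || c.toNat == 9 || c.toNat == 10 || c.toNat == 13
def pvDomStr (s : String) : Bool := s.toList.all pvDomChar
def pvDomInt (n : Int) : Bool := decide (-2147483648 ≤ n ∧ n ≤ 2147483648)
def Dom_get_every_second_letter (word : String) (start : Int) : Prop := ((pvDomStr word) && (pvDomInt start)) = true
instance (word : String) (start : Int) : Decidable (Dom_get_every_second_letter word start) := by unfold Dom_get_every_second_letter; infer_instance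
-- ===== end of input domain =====

-- B replaces A's index loop with per-character modulo test by one strided slice word[(-start)%3::3] (faster, constant-factor).

-- ===== PORT A =====
-- while i < len(word): if (i + start) % 3 == 0: sec_word += word[i]; i += 1
def pvAGo (start : Int) : Int → List Char → List Char
  | _, [] => []
  | i, c :: rest =>
    if PySem.Int.mod (i + start) 3 = 0 then c :: pvAGo start (i + 1) rest
    else pvAGo start (i + 1) rest

def get_every_second_letter (word : String) (start : Int) : String :=
  String.ofList (pvAGo start 0 word.toList)

-- ===== PORT B =====
-- return word[(-start) % 3::3]   (step 3 ≠ 0, so the slice always exists; getD "" only totalizes)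
def get_every_second_letter_alt (word : String) (start : Int) : String :=
  (PySem.Str.slice? word (some (PySem.Int.mod (-start) 3)) none 3).getD ""

-- ===== PRECONDITION & SPEC =====
def Spec_get_every_second_letter (word : String) (start : Int) (out : String) : Prop := out = get_every_second_letter_alt word start
instance (word : String) (start : Int) (out : String) : Decidable (Spec_get_every_second_letter word start out) := by unfold Spec_get_every_second_letter; infer_instance

-- ===== CLAIM (what is proved, stated in full; the proofs are below) =====
def Claim_equal_get_every_second_letter : Prop := ∀ (word : String) (start : Int), Dom_get_every_second_letter word start → Spec_get_every_second_letter word start (get_every_second_letter word start)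

-- ===== LEMMAS AND PROOFS =====

-- every third element starting at the head
def pvEvery3 : List Char → List Char
  | [] => []
  | [a] => [a]
  | [a, _] => [a]
  | a :: _ :: _ :: rest => a :: pvEvery3 rest

lemma pvEvery3_cons (c : Char) (rest : List Char) :
    pvEvery3 (c :: rest) = c :: pvEvery3 (rest.drop 2) := by
  match rest with
  | [] => rfl
  | [_] => rfl
  | _ :: _ :: _ => rfl

lemma pvAGo_eq_every3 (start : Int) (cs : List Char) : ∀ i : Int,
    pvAGo start i cs = pvEvery3 (cs.drop (PySem.Int.mod (-(i + start)) 3).toNat) := by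
  induction cs with
  | nil => intro i; simp [pvAGo, pvEvery3]
  | cons c rest ih =>
    intro i
    rw [pvAGo]
    have h3 : (0:Int) < 3 := by norm_num
    rw [PySem.Int.mod_eq_emod_of_pos h3, PySem.Int.mod_eq_emod_of_pos h3]
    by_cases h : (i + start) % 3 = 0
    · have hd : ((-(i + start)) % 3).toNat = 0 := by omega
      have h2 : ((-(i + 1 + start)) % 3).toNat = 2 := by omega
      rw [if_pos h, hd, List.drop_zero, pvEvery3_cons, ih (i + 1),
          PySem.Int.mod_eq_emod_of_pos h3, h2]
    · obtain ⟨n, h1, h2⟩ : ∃ n : Nat, ((-(i + start)) % 3).toNat = n + 1 ∧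
          ((-(i + 1 + start)) % 3).toNat = n :=
        ⟨((-(i + 1 + start)) % 3).toNat, by omega, rfl⟩
      rw [if_neg h, h1, List.drop_succ_cons, ih (i + 1),
          PySem.Int.mod_eq_emod_of_pos h3, h2]

lemma pvEvery3_eq_stride (ys : List Char) : ∀ n : Nat, n = (ys.length + 2) / 3 →
    List.filterMap (fun k => ys[3 * k]?) (List.range n) = pvEvery3 ys := by
  induction ys using pvEvery3.induct with
  | case1 => intro n hn; simp at hn; subst hn; simp [pvEvery3]
  | case2 a => intro n hn; simp at hn; subst hn; simp [pvEvery3, List.range_succ]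
  | case3 a b => intro n hn; simp at hn; subst hn; simp [pvEvery3, List.range_succ]
  | case4 a b d rest ih =>
    intro n hn
    obtain ⟨m, rfl⟩ : ∃ m, n = m + 1 := ⟨n - 1, by simp at hn; omega⟩
    rw [List.range_succ_eq_map, List.filterMap_cons, List.filterMap_map]
    have h0 : (a :: b :: d :: rest)[3 * 0]? = some a := by simp
    simp only [h0]
    have hfun : ((fun k => (a :: b :: d :: rest)[3 * k]?) ∘ Nat.succ)
        = (fun k => rest[3 * k]?) := by
      funext k
      simp only [Function.comp]
      have h31 : 3 * Nat.succ k = 3 + 3 * k := by omega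
      rw [h31, ← List.getElem?_drop]
      rfl
    rw [hfun, ih m (by simp at hn ⊢; omega)]
    rfl

lemma slice?_stride3 (xs : List Char) (i0 : Int) (h0 : 0 ≤ i0) (h1 : i0 < 3) :
    PySem.List.slice? xs (some i0) none 3 = some (pvEvery3 (List.drop i0.toNat xs)) := by
  rw [PySem.List.slice?, PySem.List.sliceIndices]
  norm_num
  by_cases hle : (xs.length : Int) ≤ i0
  · -- degenerate: the string is shorter than the offset
    have hs : min i0 (xs.length : Int) = (xs.length : Int) := by omega
    have hdrop : List.drop i0.toNat xs = [] := by
      apply List.drop_eq_nil_of_le; omega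
    rw [hs, hdrop]
    simp [pvEvery3]
    omega
  · simp only [if_neg (show ¬ i0 < 0 by omega),
      show min i0 ((xs.length : Nat) : Int) = i0 from by omega]
    have hcnt : (if i0 < (xs.length : Int) then (((xs.length : Int) - i0 + 3 - 1) / 3).toNat else 0)
        = ((List.drop i0.toNat xs).length + 2) / 3 := by
      rw [if_pos (by omega)]
      simp [List.length_drop]
      omega
    rw [hcnt]
    rw [← pvEvery3_eq_stride _ _ rfl]
    apply List.filterMap_congr
    intro k _
    have harg : (i0 + 3 * (k : Int)).toNat = i0.toNat + 3 * k := by omega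
    rw [harg, ← List.getElem?_drop]

theorem get_every_second_letter_spec : Claim_equal_get_every_second_letter := by
  intro word start _
  unfold Spec_get_every_second_letter get_every_second_letter get_every_second_letter_alt
  have hb : 0 ≤ PySem.Int.mod (-start) 3 ∧ PySem.Int.mod (-start) 3 < 3 := by
    rw [PySem.Int.mod_eq_emod_of_pos (by norm_num)]
    omega
  rw [PySem.Str.slice?, PySem.Chars.slice?_eq_listSlice?,
      slice?_stride3 word.toList _ hb.1 hb.2, pvAGo_eq_every3 start word.toList 0]
  simp
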